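-- pv_equiv track=rewrite | github.com/Traumatism/raycharles | raycharles/utils.py | detect_parameters
-- ===== SOURCE A (Python) =====
-- def detect_parameters(url: str):
--     """ Detect where are the injection entrypoints """
--
--     target = [""]
--     idx = 0
--
--     for char in url:
--         if char == "*":
--             idx += 2
--             target.append("FUZZ")
--             target.append("")
--         else:
--             target[idx] += char
--
--     return target[:-1] if target[-1] == "" else target
-- ===== SOURCE B (Python) =====
-- def detect_parameters(url: str):
--     """ Detect where are the injection entrypoints """
--     out = []
--     for i, seg in enumerate(url.split("*")):
--         if i:
--             out.append("FUZZ")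
--         out.append(seg)
--     if out and out[-1] == "":
--         out.pop()
--     return out
-- ===== Notes on version B (the rewrite author's own statement) =====
-- stated objective: faster
-- what changed: B splits the URL on the marker character once and interleaves FUZZ entries between the segments, instead of A's character-by-character loop that repeatedly concatenates onto a string at a running list index; a trailing empty segment is popped after the loop.
import Mathlib
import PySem

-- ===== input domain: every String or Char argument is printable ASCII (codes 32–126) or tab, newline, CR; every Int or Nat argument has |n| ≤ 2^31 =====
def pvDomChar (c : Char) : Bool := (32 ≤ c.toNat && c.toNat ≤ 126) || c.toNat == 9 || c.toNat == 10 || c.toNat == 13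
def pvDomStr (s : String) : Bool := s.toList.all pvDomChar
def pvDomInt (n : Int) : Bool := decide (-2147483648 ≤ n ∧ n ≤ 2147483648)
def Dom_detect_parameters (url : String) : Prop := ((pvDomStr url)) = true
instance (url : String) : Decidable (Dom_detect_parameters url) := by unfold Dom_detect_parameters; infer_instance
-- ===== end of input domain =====

-- B replaces A's character loop with a running index by one split on '*' plus an
-- interleaving pass over the segments (objective: simpler).

-- ===== PORT A =====
-- A's loop state: (target, idx); target[idx] += char is exact here because idx is
-- always a valid index of target (idx = target.length - 1 throughout the loop).
def detect_parameters (url : String) : List String :=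
  let st := url.toList.foldl
    (fun (p : List String × Nat) char =>
      if char = '*' then (p.1 ++ ["FUZZ", ""], p.2 + 2)
      else (p.1.set p.2 ((p.1.getD p.2 "") ++ String.singleton char), p.2))
    ([""], 0)
  -- target[-1] / target[:-1]: target is always nonempty, so getLastD "" is exact
  if st.1.getLastD "" = "" then st.1.dropLast else st.1

-- ===== PORT B =====
def detect_parameters_alt (url : String) : List String :=
  -- url.split('*'): sep ≠ "" form of Python str.split
  let parts : List String := (PySem.Chars.splitOn url.toList ['*']).map String.ofList
  let out := (PySem.List.enumerate parts 0).foldl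
    (fun (acc : List String) (p : Int × String) =>
      (if p.1 ≠ 0 then acc ++ ["FUZZ"] else acc) ++ [p.2]) []
  if out ≠ [] ∧ out.getLastD "" = "" then out.dropLast else out

-- ===== PRECONDITION & SPEC =====
def Spec_detect_parameters (url : String) (out : List String) : Prop := out = detect_parameters_alt url
instance (url : String) (out : List String) : Decidable (Spec_detect_parameters url out) := by unfold Spec_detect_parameters; infer_instance

-- ===== CLAIM (what is proved, stated in full; the proofs are below) =====
def Claim_equal_detect_parameters : Prop := ∀ (url : String), Dom_detect_parameters url → Spec_detect_parameters url (detect_parameters url)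

-- ===== LEMMAS AND PROOFS =====

-- Segments of a char list split on '*', with the partial current segment `cur`.
def pvSegs (cur : List Char) : List Char → List (List Char)
  | [] => [cur]
  | c :: rest => if c = '*' then cur :: pvSegs [] rest else pvSegs (cur ++ [c]) rest

lemma pvSegs_ne_nil (cur : List Char) (l : List Char) : pvSegs cur l ≠ [] := by
  induction l generalizing cur with
  | nil => simp [pvSegs]
  | cons c rest ih => by_cases h : c = '*' <;> simp [pvSegs, h, ih]

-- splitOn with single-char separator '*' is pvSegs.
lemma splitOn_go_star (l : List Char) : ∀ (fuel : Nat), l.length < fuel →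
    ∀ (cur : List Char) (acc : List (List Char)),
    PySem.Chars.splitOn.go ['*'] fuel l cur acc = acc.reverse ++ pvSegs cur.reverse l := by
  induction l with
  | nil =>
    intro fuel hf cur acc
    match fuel, hf with
    | fuel+1, _ => simp [PySem.Chars.splitOn.go, pvSegs]
  | cons c rest ih =>
    intro fuel hf cur acc
    match fuel, hf with
    | fuel+1, hf =>
      by_cases h : c = '*'
      · subst h
        have : (['*'].isPrefixOf ('*' :: rest)) = true := by simp [List.isPrefixOf]
        simp only [PySem.Chars.splitOn.go, this, if_pos, List.length_singleton,
          List.drop_succ_cons, List.drop_zero]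
        rw [ih fuel (by simpa using hf) [] (cur.reverse :: acc)]
        simp [pvSegs]
      · have hpre : (['*'].isPrefixOf (c :: rest)) = false := by
          simp [List.isPrefixOf]; exact fun hc => absurd hc.symm h
        simp only [PySem.Chars.splitOn.go, hpre, Bool.false_eq_true, if_false]
        rw [ih fuel (by simpa using hf) (c :: cur) acc]
        simp [pvSegs, if_neg h]

lemma splitOn_star (l : List Char) : PySem.Chars.splitOn l ['*'] = pvSegs [] l := by
  unfold PySem.Chars.splitOn
  rw [splitOn_go_star l (l.length + 1) (by omega) [] []]
  simp

-- The interleaved result on a segment list.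
def pvInter (segs : List (List Char)) : List String :=
  match segs with
  | [] => []
  | s :: rest => String.ofList s :: rest.flatMap (fun t => ["FUZZ", String.ofList t])

-- A's loop computes pvInter of the segments.
lemma loopA (l : List Char) : ∀ (pre : List String) (cur : List Char),
    (l.foldl
      (fun (p : List String × Nat) char =>
        if char = '*' then (p.1 ++ ["FUZZ", ""], p.2 + 2)
        else (p.1.set p.2 ((p.1.getD p.2 "") ++ String.singleton char), p.2))
      (pre ++ [String.ofList cur], pre.length)).1 = pre ++ pvInter (pvSegs cur l) := by
  induction l with
  | nil => intro pre cur; simp [pvSegs, pvInter]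
  | cons c rest ih =>
    intro pre cur
    by_cases h : c = '*'
    · subst h
      rw [List.foldl_cons, if_pos rfl]
      have h1 : pre ++ [String.ofList cur] ++ ["FUZZ", ""] = (pre ++ [String.ofList cur, "FUZZ"]) ++ [String.ofList ([] : List Char)] := by simp
      have hlen : pre.length + 2 = (pre ++ [String.ofList cur, "FUZZ"]).length := by simp
      rw [h1, hlen, ih]
      have hne := pvSegs_ne_nil ([] : List Char) rest
      cases hs : pvSegs ([] : List Char) rest with
      | nil => exact absurd hs hne
      | cons s ss => simp [pvSegs, pvInter, hs]
    · simp only [List.foldl_cons, if_neg h]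
      have hset : (pre ++ [String.ofList cur]).set pre.length
          (((pre ++ [String.ofList cur]).getD pre.length "") ++ String.singleton c)
          = pre ++ [String.ofList (cur ++ [c])] := by
        rw [List.getD_eq_getElem?_getD, List.getElem?_append_right (by simp)]
        simp only [Nat.sub_self, List.getElem?_cons_zero, Option.getD_some]
        rw [show String.ofList cur ++ String.singleton c = String.ofList (cur ++ [c]) from by
          rw [String.ofList_append]; rfl]
        simp
      rw [hset, ih]
      simp [pvSegs, h]

-- B's interleaving fold, for start index ≥ 1, appends "FUZZ" before every segment.
lemma loopB (parts : List String) : ∀ (k : Int), 1 ≤ k → ∀ (acc : List String),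
    (PySem.List.enumerate parts k).foldl
      (fun (acc : List String) (p : Int × String) =>
        (if p.1 ≠ 0 then acc ++ ["FUZZ"] else acc) ++ [p.2]) acc
    = acc ++ parts.flatMap (fun t => ["FUZZ", t]) := by
  induction parts with
  | nil => intro k _ acc; simp [PySem.List.enumerate_nil]
  | cons s rest ih =>
    intro k hk acc
    rw [PySem.List.enumerate_cons, List.foldl_cons]
    have hne : k ≠ 0 := by omega
    rw [if_pos hne, ih (k + 1) (by omega)]
    simp

theorem detect_parameters_spec : Claim_equal_detect_parameters := by
  intro url _
  have hA := loopA url.toList [] []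
  simp only [List.nil_append, List.length_nil] at hA
  have hcur : String.ofList ([] : List Char) = "" := rfl
  rw [hcur] at hA
  unfold Spec_detect_parameters detect_parameters detect_parameters_alt
  simp only [splitOn_star, hA]
  -- evaluate B's fold via the head segment + loopB
  have hne := pvSegs_ne_nil ([] : List Char) url.toList
  cases hs : pvSegs ([] : List Char) url.toList with
  | nil => exact absurd hs hne
  | cons s ss =>
    simp only [List.map_cons]
    rw [PySem.List.enumerate_cons, List.foldl_cons]
    simp only [ne_eq, not_true_eq_false, if_false, List.nil_append, zero_add]
    rw [loopB (List.map String.ofList ss) 1 (by norm_num) [String.ofList s]]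
    have hout : String.ofList s :: (ss.map String.ofList).flatMap (fun t => ["FUZZ", t])
        = pvInter (s :: ss) := by
      simp [pvInter, List.flatMap_map]
    rw [show [String.ofList s] ++ (ss.map String.ofList).flatMap (fun t => ["FUZZ", t])
        = pvInter (s :: ss) from by simpa using hout]
    have hne2 : pvInter (s :: ss) ≠ [] := by simp [pvInter]
    by_cases hl : (pvInter (s :: ss)).getLastD "" = ""
    · rw [if_pos hl, if_pos ⟨hne2, hl⟩]
    · rw [if_neg hl, if_neg (by tauto)]
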